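-- pv_equiv track=rewrite | github.com/aahmed954/Bev-AI | src/security/defense_automation.py | _find_suspicious_strings
-- ===== SOURCE A (Python) =====
-- from typing import Dict, List, Any, Optional, Set, Tuple, Union
--
-- def _find_suspicious_strings(strings: List[str]) -> List[str]:
--     """Find suspicious strings in file"""
--     suspicious_patterns = [
--         'shell32.dll', 'kernel32.dll', 'ntdll.dll',
--         'CreateProcess', 'VirtualAlloc', 'WriteProcessMemory',
--         'RegOpenKey', 'RegSetValue', 'RegDeleteKey',
--         'InternetOpen', 'HttpSendRequest', 'URLDownloadToFile',
--         'GetSystemDirectory', 'GetWindowsDirectory',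
--         'cmd.exe', 'powershell.exe', 'rundll32.exe'
--     ]
--
--     suspicious = []
--     for string in strings:
--         if len(string) > 4:  # Filter out short strings
--             for pattern in suspicious_patterns:
--                 if pattern.lower() in string.lower():
--                     suspicious.append(string)
--                     break
--
--     return suspicious[:20]  # Limit to top 20
-- ===== SOURCE B (Python) =====
-- def _find_suspicious_strings(strings):
--     """Find suspicious strings in file"""
--     suspicious_patterns = [
--         'shell32.dll', 'kernel32.dll', 'ntdll.dll',
--         'CreateProcess', 'VirtualAlloc', 'WriteProcessMemory',
--         'RegOpenKey', 'RegSetValue', 'RegDeleteKey',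
--         'InternetOpen', 'HttpSendRequest', 'URLDownloadToFile',
--         'GetSystemDirectory', 'GetWindowsDirectory',
--         'cmd.exe', 'powershell.exe', 'rundll32.exe'
--     ]
--     # Group the lowercased patterns by length: length -> set of patterns.
--     by_len = {}
--     for p in suspicious_patterns:
--         lp = p.lower()
--         by_len.setdefault(len(lp), set()).add(lp)
--     out = []
--     for s in strings:
--         if len(out) == 20:  # we already have everything we will return
--             break
--         if len(s) > 4:
--             low = s.lower()
--             n = len(low)
--             # Slide a window of each pattern length over the string and test
--             # set membership, instead of scanning for each pattern separately.
--             if any(low[i:i + L] in ps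
--                    for L, ps in by_len.items()
--                    for i in range(n - L + 1)):
--                 out.append(s)
--     return out
-- ===== Notes on version B (the rewrite author's own statement) =====
-- stated objective: alternative
-- what changed: B replaces the per-pattern substring scans with a dict that groups the lowercased patterns by length into sets, built once; each string is then tested by sliding a window of each pattern length over its lowercased form and checking set membership, and the scan stops as soon as 20 matches are collected instead of truncating at the end.
import Mathlib
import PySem

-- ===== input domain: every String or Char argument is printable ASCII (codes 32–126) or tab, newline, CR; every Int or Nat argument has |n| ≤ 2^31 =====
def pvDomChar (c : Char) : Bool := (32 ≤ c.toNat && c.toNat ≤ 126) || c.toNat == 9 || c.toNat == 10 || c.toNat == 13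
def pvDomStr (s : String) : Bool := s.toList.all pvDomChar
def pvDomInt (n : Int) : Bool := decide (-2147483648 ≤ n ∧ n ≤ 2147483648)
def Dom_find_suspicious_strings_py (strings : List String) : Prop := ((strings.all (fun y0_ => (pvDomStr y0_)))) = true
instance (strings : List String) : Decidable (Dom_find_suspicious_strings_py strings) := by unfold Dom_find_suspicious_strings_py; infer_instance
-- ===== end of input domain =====

-- B groups the lowercased patterns by length into a dict of sets once, then tests each
-- string by sliding a window of each pattern length over it and checking set membership,
-- instead of scanning the string once per pattern; it also stops once 20 matches exist.
-- ===== PORT A =====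
def pvPatternsA : List String :=
  ["shell32.dll", "kernel32.dll", "ntdll.dll",
   "CreateProcess", "VirtualAlloc", "WriteProcessMemory",
   "RegOpenKey", "RegSetValue", "RegDeleteKey",
   "InternetOpen", "HttpSendRequest", "URLDownloadToFile",
   "GetSystemDirectory", "GetWindowsDirectory",
   "cmd.exe", "powershell.exe", "rundll32.exe"]

-- the inner 'for pattern … if pattern.lower() in string.lower(): append; break' as a Bool loop
def pvInnerA (s : String) : List String → Bool
  | [] => false
  | p :: ps =>
      if PySem.Str.isIn (PySem.Str.lower p) (PySem.Str.lower s) then true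
      else pvInnerA s ps

def find_suspicious_strings_py (strings : List String) : List String :=
  let suspicious := strings.foldl (fun acc s =>
    if 4 < PySem.Str.len s then
      (if pvInnerA s pvPatternsA then acc ++ [s] else acc)
    else acc) []
  PySem.List.slice suspicious none (some 20)

-- ===== PORT B =====
-- by_len = {}; for p in suspicious_patterns: by_len.setdefault(len(p.lower()), set()).add(p.lower())
def pvPatternsB : List String :=
  ["shell32.dll", "kernel32.dll", "ntdll.dll",
   "CreateProcess", "VirtualAlloc", "WriteProcessMemory",
   "RegOpenKey", "RegSetValue", "RegDeleteKey",
   "InternetOpen", "HttpSendRequest", "URLDownloadToFile",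
   "GetSystemDirectory", "GetWindowsDirectory",
   "cmd.exe", "powershell.exe", "rundll32.exe"]

def pvByLenB : PySem.Dict Int (PySem.Set String) :=
  pvPatternsB.foldl (fun d p =>
    let lp := PySem.Str.lower p
    d.insert (PySem.Str.len lp)
      (PySem.Set.add (d.getD (PySem.Str.len lp) PySem.Set.empty) lp)) PySem.Dict.empty

-- any(low[i:i+L] in ps for L, ps in by_len.items() for i in range(n - L + 1))
def pvMatchB (low : String) : Bool :=
  pvByLenB.items.any (fun g =>
    (PySem.List.pyRange 0 (PySem.Str.len low - g.1 + 1) 1).any (fun i =>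
      PySem.Set.contains g.2 (PySem.Str.slice low (some i) (some (i + g.1)))))

def pvLoopB (out : List String) : List String → List String
  | [] => out
  | s :: rest =>
      if out.length == 20 then out
      else if 4 < PySem.Str.len s then
        (if pvMatchB (PySem.Str.lower s) then pvLoopB (out ++ [s]) rest
         else pvLoopB out rest)
      else pvLoopB out rest

def find_suspicious_strings_py_alt (strings : List String) : List String :=
  pvLoopB [] strings

-- ===== PRECONDITION & SPEC =====
def Spec_find_suspicious_strings_py (strings : List String) (out : List String) : Prop := out = find_suspicious_strings_py_alt strings
instance (strings : List String) (out : List String) : Decidable (Spec_find_suspicious_strings_py strings out) := by unfold Spec_find_suspicious_strings_py; infer_instance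

-- ===== CLAIM (what is proved, stated in full; the proofs are below) =====
def Claim_equal_find_suspicious_strings_py : Prop := ∀ (strings : List String), Dom_find_suspicious_strings_py strings → Spec_find_suspicious_strings_py strings (find_suspicious_strings_py strings)

-- ===== LEMMAS AND PROOFS =====

-- the common match predicate: length > 4 and some lowered pattern occurs in s.lower()
def pvPatternsLower : List String := pvPatternsA.map PySem.Str.lower

def pvHit (s : String) : Bool :=
  decide (4 < PySem.Str.len s) && pvPatternsLower.any (fun p => PySem.Str.isIn p (PySem.Str.lower s))

lemma pvInnerA_eq_any (s : String) (ps : List String) :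
    pvInnerA s ps = ps.any (fun p => PySem.Str.isIn (PySem.Str.lower p) (PySem.Str.lower s)) := by
  induction ps with
  | nil => rfl
  | cons p ps ih =>
      simp only [pvInnerA, List.any_cons, ih]
      cases h : PySem.Str.isIn (PySem.Str.lower p) (PySem.Str.lower s) <;> simp

lemma pvHit_eq (s : String) :
    pvHit s = (decide (4 < PySem.Str.len s) && pvInnerA s pvPatternsA) := by
  have hB : pvPatternsLower = pvPatternsA.map PySem.Str.lower := rfl
  rw [pvHit, pvInnerA_eq_any, hB, List.any_map]
  rfl

lemma bodyA_eq :
    (fun (acc : List String) s =>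
      if 4 < PySem.Str.len s then
        (if pvInnerA s pvPatternsA then acc ++ [s] else acc)
      else acc)
    = (fun (acc : List String) s => if pvHit s then acc ++ [s] else acc) := by
  funext acc s
  rw [pvHit_eq]
  by_cases hl : 4 < PySem.Str.len s
  · have hl' : 4 < s.length := by rw [PySem.Str.len_eq] at hl; exact_mod_cast hl
    by_cases hi : pvInnerA s pvPatternsA = true
    · rw [if_pos hl, if_pos hi, if_pos (by rw [hi]; simp [hl'])]
    · rw [if_pos hl, if_neg hi, if_neg (by simp only [Bool.not_eq_true] at hi; rw [hi]; simp)]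
  · have hl' : ¬ 4 < s.length := by rw [PySem.Str.len_eq] at hl; exact_mod_cast hl
    rw [if_neg hl, if_neg (by simp [hl'])]

-- a take-of-drop window is an infix
lemma window_infix {α : Type} (l : List α) (j k : Nat) : (l.drop j).take k <:+: l :=
  ((List.take_prefix _ _).isInfix).trans ((List.drop_suffix _ _).isInfix)

-- one window-group: sliding a window of the common pattern length L over low and testing
-- membership in ps finds exactly the patterns of ps occurring in low
lemma group_eq (low : String) (L : Int) (ps : List String)
    (h : ∀ p ∈ ps, (p.length : Int) = L ∧ 0 < p.length) :
    ((PySem.List.pyRange 0 (PySem.Str.len low - L + 1) 1).any (fun i =>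
        PySem.Set.contains ps (PySem.Str.slice low (some i) (some (i + L)))))
    = ps.any (fun p => PySem.Str.isIn p low) := by
  rw [Bool.eq_iff_iff]
  simp only [List.any_eq_true]
  constructor
  · rintro ⟨i, hi, hc⟩
    rw [PySem.Set.contains_iff] at hc
    refine ⟨_, hc, ?_⟩
    obtain ⟨h0, _⟩ := (PySem.List.mem_pyRange_one).mp hi
    obtain ⟨hlen, hpos⟩ := h _ hc
    have hL0 : 0 ≤ L := by omega
    have hsl : (PySem.Str.slice low (some i) (some (i + L))).toList
        = PySem.List.slice low.toList (some i) (some (i + L)) := by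
      simp [PySem.Str.toList_slice]
    rw [PySem.List.slice_toNat _ h0 (by omega)] at hsl
    rw [PySem.Str.isIn_iff_infix, hsl]
    exact window_infix _ _ _
  · rintro ⟨p, hp, hin⟩
    obtain ⟨hlen, hpos⟩ := h p hp
    rw [PySem.Str.isIn_iff_infix] at hin
    obtain ⟨t, hpt, hts⟩ := List.infix_iff_prefix_suffix.mp hin
    obtain ⟨u, hu⟩ := hts
    have ht : t = low.toList.drop u.length := by rw [← hu]; simp
    have hple : p.length ≤ t.length := hpt.length_le
    have hjn : u.length + t.length = low.toList.length := by
      rw [← hu]; simp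
    have hlowlen : low.toList.length = low.length := by simp
    refine ⟨(u.length : Int), ?_, ?_⟩
    · rw [PySem.List.mem_pyRange_one, PySem.Str.len_eq]
      omega
    · rw [PySem.Set.contains_iff]
      have hs : PySem.Str.slice low (some (u.length : Int)) (some ((u.length : Int) + L)) = p := by
        have hL : L = (p.length : Int) := hlen.symm
        apply String.toList_inj.mp
        rw [PySem.Str.toList_slice, PySem.Chars.slice_eq_listSlice, hL, ← Nat.cast_add,
          PySem.List.slice_natCast, Nat.add_sub_cancel_left, ← ht]
        exact (List.prefix_iff_eq_take.mp hpt).symm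
      rw [hs]
      exact hp

-- the lowered patterns in the order the length-grouped dict enumerates them
def pvPatternsGrouped : List String :=
  ["shell32.dll","regsetvalue",
   "kernel32.dll","virtualalloc","regdeletekey","internetopen","rundll32.exe",
   "ntdll.dll","createprocess",
   "writeprocessmemory","getsystemdirectory","regopenkey",
   "httpsendrequest","urldownloadtofile","getwindowsdirectory",
   "cmd.exe","powershell.exe"]

lemma matchB_eq_grouped (low : String) :
    pvMatchB low = pvPatternsGrouped.any (fun p => PySem.Str.isIn p low) := by
  have hitems : pvByLenB.items = [((11:Int), ["shell32.dll","regsetvalue"]),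
    ((12:Int), ["kernel32.dll","virtualalloc","regdeletekey","internetopen","rundll32.exe"]),
    ((9:Int), ["ntdll.dll"]), ((13:Int), ["createprocess"]),
    ((18:Int), ["writeprocessmemory","getsystemdirectory"]), ((10:Int), ["regopenkey"]),
    ((15:Int), ["httpsendrequest"]), ((17:Int), ["urldownloadtofile"]),
    ((19:Int), ["getwindowsdirectory"]), ((7:Int), ["cmd.exe"]),
    ((14:Int), ["powershell.exe"])] := by decide
  unfold pvMatchB
  rw [hitems]
  simp only [List.any_cons, List.any_nil, Bool.or_false]
  rw [group_eq low 11 _ (by decide), group_eq low 12 _ (by decide), group_eq low 9 _ (by decide),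
    group_eq low 13 _ (by decide), group_eq low 18 _ (by decide), group_eq low 10 _ (by decide),
    group_eq low 15 _ (by decide), group_eq low 17 _ (by decide), group_eq low 19 _ (by decide),
    group_eq low 7 _ (by decide), group_eq low 14 _ (by decide)]
  simp only [pvPatternsGrouped, List.any_cons, List.any_nil, Bool.or_false, Bool.or_assoc]

lemma matchB_eq (low : String) :
    pvMatchB low = pvPatternsLower.any (fun p => PySem.Str.isIn p low) := by
  rw [matchB_eq_grouped]
  have hperm : pvPatternsGrouped.Perm pvPatternsLower := by decide
  rw [Bool.eq_iff_iff]
  simp only [List.any_eq_true]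
  exact ⟨fun ⟨p, hp, h⟩ => ⟨p, hperm.mem_iff.mp hp, h⟩,
        fun ⟨p, hp, h⟩ => ⟨p, hperm.mem_iff.mpr hp, h⟩⟩

lemma pvLoopB_eq_take (strings : List String) (out : List String) (h : out.length ≤ 20) :
    pvLoopB out strings = (out ++ strings.filter pvHit).take 20 := by
  induction strings generalizing out with
  | nil => simp [pvLoopB, List.take_of_length_le h]
  | cons s rest ih =>
      simp only [pvLoopB, List.filter_cons]
      by_cases h20 : out.length = 20
      · rw [if_pos (by simpa using h20)]
        rw [List.take_append_of_le_length (by omega), List.take_of_length_le (by omega)]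
      · rw [if_neg (by simpa using h20)]
        by_cases hl : 4 < PySem.Str.len s
        · have hl' : 4 < s.length := by rw [PySem.Str.len_eq] at hl; exact_mod_cast hl
          rw [if_pos hl]
          cases hm : pvMatchB (PySem.Str.lower s) with
          | true =>
              have hh : pvHit s = true := by
                unfold pvHit; rw [← matchB_eq, hm]; simp [hl']
              rw [if_pos rfl, hh, if_pos rfl, ih (out ++ [s]) (by simp only [List.length_append, List.length_cons, List.length_nil]; omega)]
              simp
          | false =>
              have hh : pvHit s = false := by
                unfold pvHit; rw [← matchB_eq, hm]; simp
              rw [if_neg (by simp), hh, if_neg (by simp)]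
              exact ih out h
        · have hl' : ¬ 4 < s.length := by rw [PySem.Str.len_eq] at hl; exact_mod_cast hl
          rw [if_neg hl]
          have hh : pvHit s = false := by unfold pvHit; simp [hl']
          rw [hh, if_neg (by simp)]
          exact ih out h

-- ===== VERDICT (by name: the statement is the Claim_ definition above) =====
theorem find_suspicious_strings_py_spec : Claim_equal_find_suspicious_strings_py := by
  intro strings _
  unfold Spec_find_suspicious_strings_py find_suspicious_strings_py find_suspicious_strings_py_alt
  rw [bodyA_eq, PySem.List.foldl_append_if_eq_filter, pvLoopB_eq_take strings [] (by simp)]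
  simp [PySem.List.slice_to]
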